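-- pv_equiv track=rewrite | github.com/woojinj-01/FacSIM3 | analysis/doc_type.py | divide_by_groups
-- ===== SOURCE A (Python) =====
-- def divide_by_groups(max_rank, num_groups):
--
--     quo = int(max_rank / num_groups)
--     red = max_rank % num_groups
--
--     num_per_groups = [quo] * num_groups
--     rank_tuple_per_groups = [0] * num_groups
--
--     if red < int(num_groups / 2):
--         num_per_groups[num_groups - 1] += red
--     else:
--
--         i = 0
--
--         while red > 0:
--             num_per_groups[i] += 1
--
--             red -= 1
--             i += 1
--
--     disp = 1
--
--     for i, quota in enumerate(num_per_groups):
--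
--         start = disp
--         end = disp + quota
--
--         rank_tuple_per_groups[i] = (start, end)
--
--         disp = end
--
--     return rank_tuple_per_groups[::-1]
-- ===== SOURCE B (Python) =====
-- def divide_by_groups(max_rank, num_groups):
--     quo = int(max_rank / num_groups)
--     red = max_rank % num_groups
--     out = []
--     if red < int(num_groups / 2):
--         for i in range(num_groups):
--             start = 1 + i * quo
--             out.append((start, start + quo + (red if i == num_groups - 1 else 0)))
--     else:
--         for i in range(num_groups):
--             start = 1 + i * quo + min(i, red)
--             out.append((start, start + quo + (1 if i < red else 0)))
--     return out[::-1]
-- ===== Notes on version B (the rewrite author's own statement) =====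
-- stated objective: simpler
-- what changed: B drops A's quota list, while-loop redistribution and cumulative prefix-sum pass, emitting each (start, end) pair directly from closed-form index arithmetic (start = 1 + i*quo + min(i, red) in the distribute branch) in a single loop, then reverses.
import Mathlib
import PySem

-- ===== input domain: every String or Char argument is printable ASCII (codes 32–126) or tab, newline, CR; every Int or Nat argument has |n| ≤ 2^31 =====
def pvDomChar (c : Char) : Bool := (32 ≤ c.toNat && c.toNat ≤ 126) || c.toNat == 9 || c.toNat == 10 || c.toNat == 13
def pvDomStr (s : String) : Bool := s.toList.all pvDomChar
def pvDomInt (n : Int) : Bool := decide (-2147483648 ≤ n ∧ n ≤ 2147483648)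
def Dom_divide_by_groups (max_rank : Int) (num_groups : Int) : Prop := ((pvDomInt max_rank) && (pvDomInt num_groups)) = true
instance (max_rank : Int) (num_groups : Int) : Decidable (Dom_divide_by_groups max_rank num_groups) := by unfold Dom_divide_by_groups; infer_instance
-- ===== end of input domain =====

-- B replaces A's quota list + while-loop redistribution + cumulative prefix pass by one loop emitting
-- each (start, end) from closed-form index arithmetic (objective: simpler).

-- ===== PORT A =====
-- while red > 0: num_per_groups[i] += 1; red -= 1; i += 1
def dbgBump (npg : List Int) (red : Int) (i : Nat) : List Int :=
  if h : 0 < red then dbgBump (npg.modify i (· + 1)) (red - 1) (i + 1) else npg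
termination_by red.toNat
decreasing_by omega

-- for i, quota in enumerate(num_per_groups): start = disp; end = disp + quota; out[i] = (start, end); disp = end
def dbgTuples (npg : List Int) (disp : Int) : List (Int × Int) :=
  match npg with
  | [] => []
  | q :: rest => (disp, disp + q) :: dbgTuples rest (disp + q)

-- int(max_rank / num_groups) is float true division truncated; for |arguments| ≤ 2^31 (Dom) this is exactly
-- truncating integer division, ported as Int.tdiv. num_groups = 0 (ZeroDivisionError) and the IndexError of
-- 'num_per_groups[num_groups - 1] += red' on an empty list (num_groups < 0, first branch) are excluded by Pre_.
def divide_by_groups (max_rank : Int) (num_groups : Int) : List (Int × Int) :=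
  let quo := Int.tdiv max_rank num_groups
  let red := PySem.Int.mod max_rank num_groups
  let npg := List.replicate num_groups.toNat quo
  let npg :=
    if red < Int.tdiv num_groups 2 then
      npg.modify (num_groups.toNat - 1) (· + red)
    else
      dbgBump npg red 0
  (dbgTuples npg 1).reverse

-- ===== PORT B =====
def divide_by_groups_alt (max_rank : Int) (num_groups : Int) : List (Int × Int) :=
  let quo := Int.tdiv max_rank num_groups
  let red := PySem.Int.mod max_rank num_groups
  let out :=
    if red < Int.tdiv num_groups 2 then
      (PySem.List.pyRange 0 num_groups 1).map (fun i =>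
        let start := 1 + i * quo
        (start, start + quo + (if i = num_groups - 1 then red else 0)))
    else
      (PySem.List.pyRange 0 num_groups 1).map (fun i =>
        let start := 1 + i * quo + min i red
        (start, start + quo + (if i < red then 1 else 0)))
  out.reverse

-- ===== PRECONDITION & SPEC =====
-- Pre_ excludes exactly the inputs on which A raises: num_groups = 0 (ZeroDivisionError) and
-- num_groups < 0 with max_rank % num_groups < int(num_groups/2) (IndexError on the empty quota list).
def Pre_divide_by_groups (max_rank : Int) (num_groups : Int) : Prop :=
  0 < num_groups ∨
    (num_groups < 0 ∧ ¬ (PySem.Int.mod max_rank num_groups < Int.tdiv num_groups 2))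
instance (max_rank : Int) (num_groups : Int) : Decidable (Pre_divide_by_groups max_rank num_groups) := by
  unfold Pre_divide_by_groups; infer_instance

def pvWitness_divide_by_groups : Int × Int := (10, 3)

def Spec_divide_by_groups (max_rank : Int) (num_groups : Int) (out : List (Int × Int)) : Prop := out = divide_by_groups_alt max_rank num_groups
instance (max_rank : Int) (num_groups : Int) (out : List (Int × Int)) : Decidable (Spec_divide_by_groups max_rank num_groups out) := by unfold Spec_divide_by_groups; infer_instance

-- ===== CLAIM (what is proved, stated in full; the proofs are below) =====
def Claim_equal_divide_by_groups : Prop := ∀ (max_rank : Int) (num_groups : Int), Dom_divide_by_groups max_rank num_groups → Pre_divide_by_groups max_rank num_groups → Spec_divide_by_groups max_rank num_groups (divide_by_groups max_rank num_groups)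

-- ===== LEMMAS AND PROOFS =====

theorem dbgBump_nonpos (L : List Int) (red : Int) (i : Nat) (h : ¬ 0 < red) :
    dbgBump L red i = L := by
  rw [dbgBump]; simp [h]

theorem dbgBump_pos (L : List Int) (red : Int) (i : Nat) (h : 0 < red) :
    dbgBump L red i = dbgBump (L.modify i (· + 1)) (red - 1) (i + 1) := by
  rw [dbgBump]; simp [h]

-- modify at the index right after a prefix
theorem modify_append_len {A : List Int} {q : Int} {B : List Int} {i : Nat} (f : Int → Int)
    (hA : A.length = i) : (A ++ q :: B).modify i f = A ++ f q :: B := by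
  subst hA
  induction A with
  | nil => simp
  | cons a rest ih => simp [ih]

theorem dbgBump_repl (quo : Int) (r : Nat) :
    ∀ (i k : Nat), i + r ≤ k →
      dbgBump (List.replicate i (quo + 1) ++ List.replicate (k - i) quo) (r : Int) i
        = List.replicate (i + r) (quo + 1) ++ List.replicate (k - (i + r)) quo := by
  induction r with
  | zero => intro i k _; simp [dbgBump_nonpos]
  | succ r ih =>
      intro i k hik
      have hk : k - i = (k - (i+1)) + 1 := by omega
      rw [dbgBump_pos _ _ _ (by exact_mod_cast Int.ofNat_succ_pos r)]
      rw [hk, List.replicate_succ]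
      have hlen : (List.replicate i (quo + 1)).length = i := by simp
      rw [modify_append_len _ hlen]
      have hc : ((r + 1 : Nat) : Int) - 1 = (r : Int) := by push_cast; ring
      rw [show (List.replicate i (quo+1) ++ (quo + 1) :: List.replicate (k-(i+1)) quo)
            = List.replicate (i+1) (quo+1) ++ List.replicate (k-(i+1)) quo from by
          rw [List.replicate_succ']; simp]
      rw [hc, ih (i+1) k (by omega)]
      congr 2 <;> omega

theorem dbgTuples_append (L1 L2 : List Int) (d : Int) :
    dbgTuples (L1 ++ L2) d = dbgTuples L1 d ++ dbgTuples L2 (d + L1.sum) := by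
  induction L1 generalizing d with
  | nil => simp [dbgTuples]
  | cons q rest ih => simp [dbgTuples, ih, add_assoc]

theorem dbgTuples_replicate (a : Nat) (x d : Int) :
    dbgTuples (List.replicate a x) d
      = (List.range a).map (fun (i : Nat) => (d + (i : Int) * x, d + ((i : Int) + 1) * x)) := by
  induction a generalizing d with
  | zero => simp [dbgTuples]
  | succ a ih =>
      rw [List.replicate_succ, List.range_succ_eq_map]
      simp only [dbgTuples, ih, List.map_cons, List.map_map]
      refine congrArg₂ List.cons ?_ ?_
      · norm_num
      · apply List.map_congr_left; intro i _
        simp only [Function.comp_apply, Prod.mk.injEq]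
        constructor <;> (push_cast; ring)

theorem divide_by_groups_main (m n : Int) (hpre : Pre_divide_by_groups m n) :
    divide_by_groups m n = divide_by_groups_alt m n := by
  unfold divide_by_groups divide_by_groups_alt
  dsimp only
  set quo := Int.tdiv m n with hquo
  set red := PySem.Int.mod m n with hred
  rcases hpre with hn | ⟨hn, hcond⟩
  · -- 0 < n
    obtain ⟨k, hk⟩ : ∃ k : Nat, n = (k : Int) := ⟨n.toNat, by omega⟩
    have hk1 : 1 ≤ k := by omega
    have hredlo : 0 ≤ red := PySem.Int.mod_nonneg m (by omega : (0:Int) < n)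
    have hredhi : red < n := PySem.Int.mod_lt m (by omega : (0:Int) < n)
    have hrange : PySem.List.pyRange 0 n 1 = (List.range k).map (fun (j : Nat) => (0 : Int) + (j : Int)) := by
      rw [PySem.List.pyRange_one, show ((n - (0:Int)).toNat) = k from by omega]
    have hkn : n.toNat = k := by omega
    rw [hkn, hrange]
    by_cases hc : red < Int.tdiv n 2
    · rw [if_pos hc, if_pos hc]
      rw [show List.replicate k quo = List.replicate (k-1) quo ++ [quo] from by
            conv_lhs => rw [show k = (k-1)+1 from by omega]
            rw [List.replicate_succ']]
      rw [modify_append_len _ (by simp : (List.replicate (k-1) quo).length = k-1)]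
      rw [dbgTuples_append, dbgTuples_replicate, List.map_map]
      rw [show k = (k-1)+1 from by omega, List.range_succ, List.map_append]
      refine congrArg List.reverse (congrArg₂ (· ++ ·) ?_ ?_)
      · apply List.map_congr_left; intro i hi
        have hi' : i < k - 1 := List.mem_range.mp hi
        have hne : (0:Int) + (i:Int) ≠ n - 1 := by omega
        simp only [Function.comp_apply, if_neg hne, Prod.mk.injEq]
        constructor <;> ring
      · have heq : (0:Int) + ((k-1 : Nat) : Int) = n - 1 := by omega
        simp only [dbgTuples, List.sum_replicate, List.map_cons, List.map_nil,
          Function.comp_apply, if_pos heq, nsmul_eq_mul, Nat.add_sub_cancel,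
          List.cons.injEq, Prod.mk.injEq, and_true]
        constructor <;> ring
    · rw [if_neg hc, if_neg hc]
      obtain ⟨b, hk2⟩ : ∃ b, k = red.toNat + b := ⟨k - red.toNat, by omega⟩
      have hared : ((red.toNat : Nat) : Int) = red := by omega
      rw [hk2]
      have hb : dbgBump (List.replicate (red.toNat + b) quo) red 0
          = List.replicate red.toNat (quo+1) ++ List.replicate b quo := by
        have h := dbgBump_repl quo red.toNat 0 (red.toNat + b) (by omega)
        simp only [Nat.zero_add, Nat.sub_zero, List.replicate_zero, List.nil_append, hared] at h
        rw [h, show red.toNat + b - red.toNat = b from by omega]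
      rw [hb, dbgTuples_append, dbgTuples_replicate, dbgTuples_replicate, List.map_map,
          List.range_add, List.map_append, List.map_map]
      refine congrArg List.reverse (congrArg₂ (· ++ ·) ?_ ?_)
      · apply List.map_congr_left; intro i hi
        have hi' : i < red.toNat := List.mem_range.mp hi
        have h1 : (0:Int) + (i:Int) ≤ red := by omega
        have h2 : (0:Int) + (i:Int) < red := by omega
        simp only [Function.comp_apply, min_eq_left h1, if_pos h2, Prod.mk.injEq]
        constructor <;> ring
      · apply List.map_congr_left; intro j _
        have h1 : red ≤ (0:Int) + ((red.toNat + j : Nat) : Int) := by omega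
        have h2 : ¬ ((0:Int) + ((red.toNat + j : Nat) : Int) < red) := by omega
        simp only [Function.comp_apply, min_eq_right h1, if_neg h2, List.sum_replicate,
          nsmul_eq_mul, Prod.mk.injEq]
        constructor <;> (push_cast [hared]; ring)
  · -- n < 0, else branch on both sides
    have h0 : n.toNat = 0 := by omega
    have hrle : ¬ 0 < red := by
      have := (PySem.Int.mod_neg_bounds m hn).2
      omega
    rw [if_neg hcond, if_neg hcond, h0]
    rw [List.replicate_zero, dbgBump_nonpos _ _ _ hrle,
        PySem.List.pyRange_one_eq_nil (by omega)]
    rfl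

-- ===== VERDICT (by name: the statement is the Claim_ definition above) =====
theorem divide_by_groups_spec : Claim_equal_divide_by_groups := by
  intro m n _ hpre
  exact divide_by_groups_main m n hpre
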